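-- pv_equiv track=rewrite | github.com/diaspedro7/dashboard-senai-stihl | components/historico.py | trocar_meses_para_portugues
-- ===== SOURCE A (Python) =====
-- def trocar_meses_para_portugues(data_str):
--     meses_en_pt = {
--         'Jan': 'Jan',
--         'Feb': 'Fev',
--         'Mar': 'Mar',
--         'Apr': 'Abr',
--         'May': 'Mai',
--         'Jun': 'Jun',
--         'Jul': 'Jul',
--         'Aug': 'Ago',
--         'Sep': 'Set',
--         'Oct': 'Out',
--         'Nov': 'Nov',
--         'Dec': 'Dez'    }
--
--     # Substituir os meses no formato 'Mês' pelo mês correspondente em português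
--     for mes_en, mes_pt in meses_en_pt.items():
--         data_str = data_str.replace(mes_en, mes_pt)
--     return data_str
-- ===== SOURCE B (Python) =====
-- def trocar_meses_para_portugues(data_str):
--     meses_en_pt = dict(zip(
--         'Jan Feb Mar Apr May Jun Jul Aug Sep Oct Nov Dec'.split(),
--         'Jan Fev Mar Abr Mai Jun Jul Ago Set Out Nov Dez'.split()))
--     # Single left-to-right pass: at each position try the 3-char chunk in the dict.
--     partes = []
--     i = 0
--     n = len(data_str)
--     while i < n:
--         trecho = data_str[i:i + 3]
--         if trecho in meses_en_pt:
--             partes.append(meses_en_pt[trecho])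
--             i += 3
--         else:
--             partes.append(data_str[i])
--             i += 1
--     return ''.join(partes)
-- ===== Notes on version B (the rewrite author's own statement) =====
-- stated objective: alternative
-- what changed: Replaces the 12 sequential full-string str.replace passes by a single left-to-right scan that looks each 3-char chunk up in the month dict (valid because no key overlaps another occurrence and no replacement creates a new key occurrence).
import Mathlib
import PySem

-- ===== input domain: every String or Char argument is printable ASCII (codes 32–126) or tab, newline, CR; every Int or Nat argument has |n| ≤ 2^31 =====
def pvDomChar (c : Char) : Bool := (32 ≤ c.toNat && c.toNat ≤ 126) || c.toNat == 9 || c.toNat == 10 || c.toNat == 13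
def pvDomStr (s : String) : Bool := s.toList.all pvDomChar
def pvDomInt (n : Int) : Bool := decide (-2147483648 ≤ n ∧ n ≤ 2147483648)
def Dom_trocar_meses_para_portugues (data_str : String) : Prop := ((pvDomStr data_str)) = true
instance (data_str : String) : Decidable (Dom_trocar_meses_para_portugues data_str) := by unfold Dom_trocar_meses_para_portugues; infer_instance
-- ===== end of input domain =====

-- B replaces A's twelve sequential full-string str.replace passes by ONE left-to-right scan that
-- looks each 3-character chunk up in the month table (objective: alternative, same exact result).

-- ===== PORT A =====
def trocar_meses_para_portugues (data_str : String) : String :=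
  let meses_en_pt : PySem.Dict String String := PySem.Dict.ofList
    [("Jan", "Jan"), ("Feb", "Fev"), ("Mar", "Mar"), ("Apr", "Abr"),
     ("May", "Mai"), ("Jun", "Jun"), ("Jul", "Jul"), ("Aug", "Ago"),
     ("Sep", "Set"), ("Oct", "Out"), ("Nov", "Nov"), ("Dec", "Dez")]
  (PySem.Dict.items meses_en_pt).foldl
    (fun s p => PySem.Str.replace s p.1 p.2) data_str

-- ===== PORT B =====
-- Source B's month dict: zip of the two split word lists, as an association list over the code
-- points (lookup = first match, as in Source B)
def pvMeses : List (List Char × List Char) :=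
  (List.zip (PySem.Str.split₀ "Jan Feb Mar Apr May Jun Jul Aug Sep Oct Nov Dec")
            (PySem.Str.split₀ "Jan Fev Mar Abr Mai Jun Jul Ago Set Out Nov Dez")).map
    (fun p => (p.1.toList, p.2.toList))

-- Source B's while loop: look the 3-char chunk at the cursor up; on a hit emit the replacement and
-- advance by 3, otherwise emit the character and advance by 1.
def pvScan : List Char → List Char
  | [] => []
  | c :: t =>
    match pvMeses.find? (fun p => p.1 == (c :: t).take 3) with
    | some p => p.2 ++ pvScan (t.drop 2)
    | none => c :: pvScan t
termination_by l => l.length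
decreasing_by all_goals simp [List.length_drop]

def trocar_meses_para_portugues_alt (data_str : String) : String :=
  String.ofList (pvScan data_str.toList)

-- ===== PRECONDITION & SPEC =====
def Spec_trocar_meses_para_portugues (data_str : String) (out : String) : Prop := out = trocar_meses_para_portugues_alt data_str
instance (data_str : String) (out : String) : Decidable (Spec_trocar_meses_para_portugues data_str out) := by unfold Spec_trocar_meses_para_portugues; infer_instance

-- ===== CLAIM (what is proved, stated in full; the proofs are below) =====
def Claim_equal_trocar_meses_para_portugues : Prop := ∀ (data_str : String), Dom_trocar_meses_para_portugues data_str → Spec_trocar_meses_para_portugues data_str (trocar_meses_para_portugues data_str)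

-- ===== LEMMAS AND PROOFS =====

-- pvScan, generalised over the table (pvScan = pvScanP pvMeses)
def pvScanP (ps : List (List Char × List Char)) : List Char → List Char
  | [] => []
  | c :: t =>
    match ps.find? (fun p => p.1 == (c :: t).take 3) with
    | some p => p.2 ++ pvScanP ps (t.drop 2)
    | none => c :: pvScanP ps t
termination_by l => l.length
decreasing_by all_goals simp [List.length_drop]

theorem pvScan_eq_scanP : ∀ l, pvScan l = pvScanP pvMeses l := by
  intro l
  induction l using pvScan.induct with
  | case1 => simp [pvScan, pvScanP]
  | case2 c t p hfind ih =>
      rw [pvScan, pvScanP, hfind]; simp [ih]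
  | case3 c t hfind ih =>
      rw [pvScan, pvScanP, hfind]; simp [ih]

-- a well-shaped table entry: two 3-char words with the same (uppercase) initial and lowercase interiors
def pvGoodP (p : List Char × List Char) : Bool :=
  match p with
  | ([a, b, c], [d, e, f]) =>
      a == d && a.isUpper && b.isLower && c.isLower && e.isLower && f.isLower
  | _ => false

def pvGood (ps : List (List Char × List Char)) : Prop := ∀ p ∈ ps, pvGoodP p = true

theorem pvLower_ne_upper (c d : Char) (h1 : c.isLower = true) (h2 : d.isUpper = true) : c ≠ d := by
  simp [Char.isLower, Char.isUpper, UInt32.le_iff_toNat_le] at h1 h2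
  rintro rfl
  omega

theorem pvGo_nil (old new : List Char) (fuel : Nat) (acc : List Char) :
    PySem.Chars.replace.go old new fuel [] acc = acc.reverse := by
  cases fuel <;> simp [PySem.Chars.replace.go]

theorem pvGo_acc (old new : List Char) :
    ∀ fuel l (acc : List Char),
      PySem.Chars.replace.go old new fuel l acc = acc.reverse ++ PySem.Chars.replace.go old new fuel l [] := by
  intro fuel
  induction fuel with
  | zero => intro l acc; simp [PySem.Chars.replace.go]
  | succ f ih =>
    intro l acc
    cases l with
    | nil => simp [pvGo_nil]
    | cons c t =>
      by_cases h : old.isPrefixOf (c :: t) = true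
      · simp only [PySem.Chars.replace.go, h, if_true]
        rw [ih _ (new.reverse ++ acc), ih _ (new.reverse ++ [])]
        simp
      · simp only [PySem.Chars.replace.go, eq_false_of_ne_true h, Bool.false_eq_true, if_false]
        rw [ih _ (c :: acc), ih _ [c]]
        simp

theorem pvGo_fuel (old new : List Char) (hold : old ≠ []) :
    ∀ f1 f2 l (acc : List Char), l.length ≤ f1 → l.length ≤ f2 →
      PySem.Chars.replace.go old new f1 l acc = PySem.Chars.replace.go old new f2 l acc := by
  intro f1
  induction f1 with
  | zero =>
    intro f2 l acc h1 h2
    have : l = [] := by cases l <;> simp_all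
    subst this
    simp [pvGo_nil, PySem.Chars.replace.go]
  | succ f ih =>
    intro f2 l acc h1 h2
    cases l with
    | nil => simp [pvGo_nil]
    | cons c t =>
      cases f2 with
      | zero => simp at h2
      | succ f2' =>
        have hlen : 1 ≤ old.length := by cases old <;> simp_all
        by_cases h : old.isPrefixOf (c :: t) = true
        · simp only [PySem.Chars.replace.go, h, if_true]
          apply ih
          · simp only [List.length_drop, List.length_cons] at h1 ⊢; omega
          · simp only [List.length_drop, List.length_cons] at h2 ⊢; omega
        · simp only [PySem.Chars.replace.go, eq_false_of_ne_true h, Bool.false_eq_true, if_false]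
          apply ih
          · simp at h1 ⊢; omega
          · simp at h2 ⊢; omega

theorem pvRep_nil (old new : List Char) (hold : old ≠ []) :
    PySem.Chars.replace [] old new = [] := by
  simp [PySem.Chars.replace, List.isEmpty_eq_false_iff.mpr hold, pvGo_nil]

theorem pvRep_neg (old new : List Char) (hold : old ≠ []) (c : Char) (t : List Char)
    (h : old.isPrefixOf (c :: t) = false) :
    PySem.Chars.replace (c :: t) old new = c :: PySem.Chars.replace t old new := by
  simp only [PySem.Chars.replace, List.isEmpty_eq_false_iff.mpr hold, Bool.false_eq_true, if_false]
  simp only [PySem.Chars.replace.go, h, Bool.false_eq_true, if_false, List.length_cons]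
  rw [pvGo_acc]
  simp

theorem pvRep_pos (old new l : List Char) (hold : old ≠ []) (h : old.isPrefixOf l = true) :
    PySem.Chars.replace l old new = new ++ PySem.Chars.replace (l.drop old.length) old new := by
  cases l with
  | nil =>
    cases old with
    | nil => exact absurd rfl hold
    | cons o os => simp [List.isPrefixOf] at h
  | cons c t =>
    have hlen : 1 ≤ old.length := by cases old <;> simp_all
    simp only [PySem.Chars.replace, List.isEmpty_eq_false_iff.mpr hold, Bool.false_eq_true, if_false]
    simp only [PySem.Chars.replace.go, h, if_true, List.length_cons]
    rw [pvGo_acc]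
    rw [pvGo_fuel old new hold t.length (List.drop old.length (c :: t)).length]
    · simp
    · simp; omega
    · simp

theorem pvGoodP_shape (p : List Char × List Char) (h : pvGoodP p = true) :
    ∃ a b c d e f, p = ([a, b, c], [d, e, f]) ∧ a = d ∧ a.isUpper = true ∧
      b.isLower = true ∧ c.isLower = true ∧ e.isLower = true ∧ f.isLower = true := by
  unfold pvGoodP at h
  split at h
  · rename_i a b c d e f
    simp only [Bool.and_eq_true, beq_iff_eq] at h
    exact ⟨a, b, c, d, e, f, rfl, h.1.1.1.1.1, h.1.1.1.1.2, h.1.1.1.2, h.1.1.2, h.1.2, h.2⟩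
  · simp at h

-- no table key matches at a lowercase character
theorem pvFind_none_of_lower (ps : List (List Char × List Char)) (hG : pvGood ps)
    (c : Char) (hc : c.isLower = true) (t : List Char) :
    ps.find? (fun p => p.1 == (c :: t).take 3) = none := by
  rw [List.find?_eq_none]
  intro p hp
  obtain ⟨a, b, c', d, e, f, hpeq, -, ha, -⟩ := pvGoodP_shape p (hG p hp)
  subst hpeq
  simp only [beq_iff_eq, List.take_succ_cons]
  intro hEq
  exact pvLower_ne_upper c a hc ha (by injection hEq with h1 _; exact h1.symm)

-- the scan never changes the first character (replacements share their initial with their key)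
theorem pvHead_scanP (ps : List (List Char × List Char)) (hG : pvGood ps) :
    ∀ l, (pvScanP ps l).head? = l.head? := by
  intro l
  induction l using pvScanP.induct ps with
  | case1 => simp [pvScanP]
  | case2 c t p hfind ih =>
      rw [pvScanP, hfind]
      have hp := hG p (List.mem_of_find?_eq_some hfind)
      have hpred := List.find?_some hfind
      obtain ⟨a, b, c', d, e, f, hpeq, had, -⟩ := pvGoodP_shape p hp
      subst hpeq
      simp only [beq_iff_eq, List.take_succ_cons] at hpred
      have hac : a = c := by have := congrArg List.head? hpred; simpa using this
      simp [← had, hac]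
  | case3 c t hfind ih =>
      rw [pvScanP, hfind]
      simp

-- the scan creates no NEW occurrence of a well-shaped key at the cursor
theorem pvNoNewMatch (ps : List (List Char × List Char)) (hG : pvGood ps)
    (en pt : List Char) (hgp : pvGoodP (en, pt) = true) (c : Char) (t : List Char)
    (h : en.isPrefixOf (c :: t) = false) :
    en.isPrefixOf (c :: pvScanP ps t) = false := by
  obtain ⟨x, y, z, x', y', z', heq, -, hxu, hyl, hzl, -, -⟩ := pvGoodP_shape (en, pt) hgp
  have hen : en = [x, y, z] := congrArg Prod.fst heq
  subst hen
  by_cases hxc : x = c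
  · subst hxc
    have h2 : [y, z].isPrefixOf t = false := by
      cases hyp : [y, z].isPrefixOf t
      · rfl
      · rw [List.isPrefixOf, hyp] at h; simp at h
    cases t with
    | nil => simp [pvScanP, List.isPrefixOf]
    | cons d t' =>
      by_cases hyd : y = d
      · subst hyd
        rw [pvScanP, pvFind_none_of_lower ps hG y hyl t']
        have h3 : [z].isPrefixOf t' = false := by
          cases hyp : [z].isPrefixOf t'
          · rfl
          · rw [List.isPrefixOf, hyp] at h2; simp at h2
        cases t' with
        | nil => simp [pvScanP, List.isPrefixOf]
        | cons e2 t2 =>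
          have hze : (z == e2) = false := by
            cases hyp : (z == e2)
            · rfl
            · rw [List.isPrefixOf, hyp] at h3; simp at h3
          have hh := pvHead_scanP ps hG (e2 :: t2)
          cases hps : pvScanP ps (e2 :: t2) with
          | nil => rw [hps] at hh; simp at hh
          | cons w ws =>
            rw [hps] at hh
            simp only [List.head?_cons, Option.some.injEq] at hh
            subst hh
            simp [List.isPrefixOf, hze]
      · have hh := pvHead_scanP ps hG (d :: t')
        cases hps : pvScanP ps (d :: t') with
        | nil => rw [hps] at hh; simp at hh
        | cons w ws =>
          rw [hps] at hh
          simp only [List.head?_cons, Option.some.injEq] at hh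
          subst hh
          simp [List.isPrefixOf, hyd]
  · simp [List.isPrefixOf, hxc]

-- one replace pass walks unchanged over an emitted replacement word
theorem pvPassWord (en pt : List Char) (hgp : pvGoodP (en, pt) = true)
    (w : List Char × List Char) (hw : pvGoodP w = true) (hne : w.2 ≠ en) (X : List Char) :
    PySem.Chars.replace (w.2 ++ X) en pt = w.2 ++ PySem.Chars.replace X en pt := by
  obtain ⟨x, y, z, x', y', z', heq, -, hxu, -, -, -, -⟩ := pvGoodP_shape (en, pt) hgp
  have hen : en = [x, y, z] := congrArg Prod.fst heq
  obtain ⟨a, b, c, d, e, f, hweq, -, -, -, -, hel, hfl⟩ := pvGoodP_shape w hw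
  have hw2 : w.2 = [d, e, f] := congrArg Prod.snd hweq
  have hold : en ≠ [] := by rw [hen]; simp
  rw [hw2]
  have h1 : en.isPrefixOf (d :: e :: f :: X) = false := by
    cases hyp : en.isPrefixOf (d :: e :: f :: X)
    · rfl
    · exfalso
      rw [hen] at hyp
      simp [List.isPrefixOf] at hyp
      apply hne
      rw [hw2, hen, hyp.1, hyp.2.1, hyp.2.2]
  have h2 : en.isPrefixOf (e :: f :: X) = false := by
    rw [hen]
    simp [List.isPrefixOf]
    intro hxe
    exact absurd hxe.symm (pvLower_ne_upper e x hel hxu)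
  have h3 : en.isPrefixOf (f :: X) = false := by
    rw [hen]
    simp [List.isPrefixOf]
    intro hxf
    exact absurd hxf.symm (pvLower_ne_upper f x hfl hxu)
  simp only [List.cons_append, List.nil_append]
  rw [pvRep_neg en pt hold d _ h1, pvRep_neg en pt hold e _ h2, pvRep_neg en pt hold f _ h3]

-- one more replace pass over an already-scanned string = scanning with the extended table
theorem pvStep (ps : List (List Char × List Char)) (en pt : List Char)
    (hG : pvGood ps) (hgp : pvGoodP (en, pt) = true)
    (hne2 : ∀ p ∈ ps, p.2 ≠ en) :
    ∀ l, PySem.Chars.replace (pvScanP ps l) en pt = pvScanP (ps ++ [(en, pt)]) l := by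
  obtain ⟨x, y, z, x', y', z', heq, -, hxu, hyl, hzl, -, -⟩ := pvGoodP_shape (en, pt) hgp
  have hen : en = [x, y, z] := congrArg Prod.fst heq
  have hold : en ≠ [] := by rw [hen]; simp
  have hG' : pvGood (ps ++ [(en, pt)]) := by
    intro p hp
    rcases List.mem_append.mp hp with hp | hp
    · exact hG p hp
    · simp at hp; rw [hp]; exact hgp
  have key : ∀ n (l : List Char), l.length ≤ n →
      PySem.Chars.replace (pvScanP ps l) en pt = pvScanP (ps ++ [(en, pt)]) l := by
    intro n
    induction n with
    | zero =>
      intro l hl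
      have : l = [] := by cases l <;> simp_all
      subst this
      rw [pvScanP, pvScanP]
      exact pvRep_nil en pt hold
    | succ n ih =>
      intro l hl
      cases l with
      | nil =>
        rw [pvScanP, pvScanP]
        exact pvRep_nil en pt hold
      | cons c t =>
        cases hfind : ps.find? (fun p => p.1 == (c :: t).take 3) with
        | some q =>
          have hq : q ∈ ps := List.mem_of_find?_eq_some hfind
          have hq1 : q.1 = (c :: t).take 3 := by
            have := List.find?_some hfind; simpa using this
          have hfind' : (ps ++ [(en, pt)]).find? (fun p => p.1 == (c :: t).take 3) = some q := by
            rw [List.find?_append, hfind]; rfl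
          rw [pvScanP, hfind]
          rw [pvScanP, hfind']
          rw [pvPassWord en pt hgp q (hG q hq) (hne2 q hq)]
          congr 1
          apply ih
          simp only [List.length_drop]
          simp at hl
          omega
        | none =>
          by_cases hk : en = (c :: t).take 3
          · -- the new key matches at the cursor
            have hshape : c = x ∧ ∃ t3, t = y :: z :: t3 := by
              rw [hen] at hk
              cases t with
              | nil => simp at hk
              | cons d t' =>
                cases t' with
                | nil => simp at hk
                | cons e t'' =>
                  simp at hk
                  exact ⟨hk.1.symm, t'', by rw [hk.2.1, hk.2.2]⟩
            obtain ⟨hcx, t3, ht⟩ := hshape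
            subst hcx ht
            rw [pvScanP, hfind]
            rw [pvScanP, pvFind_none_of_lower ps hG y hyl]
            rw [pvScanP, pvFind_none_of_lower ps hG z hzl]
            have hpos : en.isPrefixOf (c :: y :: z :: pvScanP ps t3) = true := by
              rw [hen]; simp [List.isPrefixOf]
            rw [pvRep_pos en pt _ hold hpos]
            have hdrop : (c :: y :: z :: pvScanP ps t3).drop en.length = pvScanP ps t3 := by
              rw [hen]; rfl
            rw [hdrop]
            have hfind' : (ps ++ [(en, pt)]).find?
                (fun p => p.1 == (c :: y :: z :: t3).take 3) = some (en, pt) := by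
              rw [List.find?_append, hfind]
              simp only [Option.none_or]
              simp [List.find?, hen]
            rw [pvScanP, hfind']
            simp only [List.drop_succ_cons, List.drop_zero]
            congr 1
            apply ih
            simp at hl
            omega
          · -- no key matches at the cursor
            have hpre : en.isPrefixOf (c :: t) = false := by
              cases hyp : en.isPrefixOf (c :: t)
              · rfl
              · exfalso
                apply hk
                have := List.prefix_iff_eq_take.mp (List.isPrefixOf_iff_prefix.mp hyp)
                rw [this, hen]; rfl
            have hfind' : (ps ++ [(en, pt)]).find? (fun p => p.1 == (c :: t).take 3) = none := by
              rw [List.find?_append, hfind]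
              simp only [Option.none_or]
              have hb : (en == c :: List.take 2 t) = false := by
                simp only [beq_eq_false_iff_ne, ne_eq]
                simpa [List.take_succ_cons] using hk
              simp [List.find?, hb]
            rw [pvScanP, hfind]
            rw [pvScanP, hfind']
            rw [pvRep_neg en pt hold c _ (pvNoNewMatch ps hG en pt hgp c t hpre)]
            congr 1
            apply ih
            simp at hl
            omega
  exact fun l => key l.length l le_rfl

-- a later key never equals an earlier replacement word
def pvSepRel (p q : List Char × List Char) : Prop := q.1 ≠ p.2

theorem pvScanP_nil_table : ∀ l, pvScanP [] l = l := by
  intro l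
  induction l with
  | nil => simp [pvScanP]
  | cons c t ih => rw [pvScanP]; simp [ih]

theorem pvFoldl_steps :
    ∀ (qs done : List (List Char × List Char)),
      pvGood (done ++ qs) → List.Pairwise pvSepRel (done ++ qs) →
      ∀ l, qs.foldl (fun s p => PySem.Chars.replace s p.1 p.2) (pvScanP done l)
            = pvScanP (done ++ qs) l := by
  intro qs
  induction qs with
  | nil => intro done hG _ l; simp
  | cons q qs' ih =>
    intro done hG hsep l
    have hGdone : pvGood done := fun p hp => hG p (List.mem_append.mpr (Or.inl hp))
    have hGq : pvGoodP q = true := hG q (List.mem_append.mpr (Or.inr (by simp)))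
    have hne2 : ∀ p ∈ done, p.2 ≠ q.1 := by
      intro p hp
      have := (List.pairwise_append.mp hsep).2.2 p hp q (by simp)
      exact fun h => this h.symm
    have hstep := pvStep done q.1 q.2 hGdone (by simpa using hGq) hne2 l
    simp only [List.foldl_cons]
    rw [hstep]
    have := ih (done ++ [q]) (by simpa using hG) (by simpa using hsep) l
    simpa using this

theorem pvCharChain (l : List Char) :
    pvMeses.foldl (fun s p => PySem.Chars.replace s p.1 p.2) l = pvScanP pvMeses l := by
  have h := pvFoldl_steps pvMeses [] (by unfold pvGood; decide) (by unfold pvSepRel; decide) l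
  simpa [pvScanP_nil_table] using h

-- a fold of Str.replace is the String wrapper of the fold of Chars.replace
theorem pvStrFold : ∀ (l : List (String × String)) (s : String),
    l.foldl (fun s p => PySem.Str.replace s p.1 p.2) s
      = String.ofList (l.foldl (fun cs p => PySem.Chars.replace cs p.1.toList p.2.toList) s.toList) := by
  intro l
  induction l with
  | nil => intro s; simp
  | cons q l ih =>
    intro s
    simp only [List.foldl_cons]
    rw [ih]
    congr 1
    simp [PySem.Str.replace]

-- ===== VERDICT (by name: the statement is the Claim_ definition above) =====
theorem trocar_meses_para_portugues_spec : Claim_equal_trocar_meses_para_portugues := by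
  intro s _
  unfold Spec_trocar_meses_para_portugues trocar_meses_para_portugues trocar_meses_para_portugues_alt
  rw [pvStrFold]
  rw [pvScan_eq_scanP, ← pvCharChain]
  congr 1
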